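-- pv_equiv track=rewrite | github.com/nnigam19/PrestoQueryConverter | src/utils/presto_functions.py | _parse_function_args
-- ===== SOURCE A (Python) =====
-- def _parse_function_args(args_str: str) -> list:
--     """
--     Parse comma-separated function arguments, respecting nested parentheses and quotes.
--     """
--     args = []
--     current_arg = []
--     depth = 0
--     in_single_quote = False
--     in_double_quote = False
--     i = 0
--     n = len(args_str)
--
--     while i < n:
--         char = args_str[i]
--
--         if char == "'" and not in_double_quote:
--             if i + 1 < n and args_str[i + 1] == "'":
--                 current_arg.append("''")
--                 i += 2
--                 continue
--             else:
--                 in_single_quote = not in_single_quote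
--                 current_arg.append(char)
--                 i += 1
--                 continue
--
--         if char == '"' and not in_single_quote:
--             if i + 1 < n and args_str[i + 1] == '"':
--                 current_arg.append('""')
--                 i += 2
--                 continue
--             else:
--                 in_double_quote = not in_double_quote
--                 current_arg.append(char)
--                 i += 1
--                 continue
--
--         if not in_single_quote and not in_double_quote:
--             if char == '(':
--                 depth += 1
--             elif char == ')':
--                 depth -= 1
--             elif char == ',' and depth == 0:
--                 args.append(''.join(current_arg))
--                 current_arg = []
--                 i += 1
--                 continue
--
--         current_arg.append(char)
--         i += 1
--
--     if current_arg:
--         args.append(''.join(current_arg))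
--
--     return args
-- ===== SOURCE B (Python) =====
-- def _parse_function_args(args_str: str) -> list:
--     """Split on top-level commas by repeatedly finding the next cut point and slicing.
--
--     Key invariant: whenever a comma counts as a top-level separator, the scanner
--     state at the character after it is neutral (depth 0, outside both quote
--     kinds), so each segment can be scanned with a fresh state.
--     """
--     n = len(args_str)
--
--     def next_cut(i: int) -> int:
--         # index of the next top-level comma at or after i, or n if none
--         depth = 0
--         in_single_quote = False
--         in_double_quote = False
--         while i < n:
--             char = args_str[i]
--             if char == "'" and not in_double_quote:
--                 if i + 1 < n and args_str[i + 1] == "'":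
--                     i += 2
--                     continue
--                 in_single_quote = not in_single_quote
--             elif char == '"' and not in_single_quote:
--                 if i + 1 < n and args_str[i + 1] == '"':
--                     i += 2
--                     continue
--                 in_double_quote = not in_double_quote
--             elif not in_single_quote and not in_double_quote:
--                 if char == '(':
--                     depth += 1
--                 elif char == ')':
--                     depth -= 1
--                 elif char == ',' and depth == 0:
--                     return i
--             i += 1
--         return n
--
--     segs = []
--     i = 0
--     while i <= n:
--         j = next_cut(i)
--         segs.append(args_str[i:j])
--         i = j + 1
--     if segs[-1] == '':
--         segs.pop()
--     return segs
-- ===== Notes on version B (the rewrite author's own statement) =====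
-- stated objective: alternative
-- what changed: Instead of one loop threading args/current_arg/depth/quote state across the whole string, B repeatedly calls a next_cut helper that finds the next top-level comma from a fresh neutral state (valid because the scanner state is provably neutral right after every top-level comma) and builds each argument by slicing args_str between cuts, dropping a trailing empty slice.
import Mathlib
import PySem

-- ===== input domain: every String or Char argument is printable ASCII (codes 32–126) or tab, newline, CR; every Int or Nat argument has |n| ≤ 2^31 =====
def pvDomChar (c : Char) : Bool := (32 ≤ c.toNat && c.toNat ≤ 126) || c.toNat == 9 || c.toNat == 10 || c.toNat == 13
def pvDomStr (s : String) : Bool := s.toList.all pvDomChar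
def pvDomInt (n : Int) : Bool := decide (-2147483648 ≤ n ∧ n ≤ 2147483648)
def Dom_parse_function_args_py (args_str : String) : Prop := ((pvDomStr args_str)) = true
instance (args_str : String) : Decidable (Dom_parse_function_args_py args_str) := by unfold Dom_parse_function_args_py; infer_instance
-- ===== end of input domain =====

-- B replaces A's single stateful accumulation loop by a "find next top-level comma, then slice"
-- decomposition (each segment is scanned with a fresh neutral state); objective: alternative, same cost.

-- ===== PORT A =====
-- A's while-loop over indices, transliterated as recursion over the remaining character list
-- (the index is only used sequentially; the args_str[i+1] lookahead is rest.head?, and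
-- consuming two characters is recursing on rest.tail).
-- current_arg accumulates exactly the consumed characters; ''.join = String.mk at append time.
def loopA (l : List Char) (args : List (List Char)) (cur : List Char)
    (depth : Int) (inS inD : Bool) : List (List Char) :=
  match l with
  | [] => if cur = [] then args else args ++ [cur]
  | c :: rest =>
    if c = '\'' ∧ inD = false then
      if rest.head? = some '\'' then loopA rest.tail args (cur ++ ['\'', '\'']) depth inS inD
      else loopA rest args (cur ++ [c]) depth (!inS) inD
    else if c = '"' ∧ inS = false then
      if rest.head? = some '"' then loopA rest.tail args (cur ++ ['"', '"']) depth inS inD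
      else loopA rest args (cur ++ [c]) depth inS (!inD)
    else if inS = false ∧ inD = false ∧ c = '(' then
      loopA rest args (cur ++ [c]) (depth + 1) inS inD
    else if inS = false ∧ inD = false ∧ c = ')' then
      loopA rest args (cur ++ [c]) (depth - 1) inS inD
    else if inS = false ∧ inD = false ∧ c = ',' ∧ depth = 0 then
      loopA rest (args ++ [cur]) [] depth inS inD
    else
      loopA rest args (cur ++ [c]) depth inS inD
termination_by l.length
decreasing_by all_goals simp [List.length_tail]

def parse_function_args_py (args_str : String) : List String :=
  (loopA args_str.toList [] [] 0 false false).map String.mk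

-- ===== PORT B =====
-- Source B's next_cut(i): here the suffix args_str[i:] is passed instead of the index i, and
-- the returned cut position is the offset j - i into that suffix (same scan, same branches).
def scanB (l : List Char) (depth : Int) (inS inD : Bool) : Nat :=
  match l with
  | [] => 0
  | c :: rest =>
    if c = '\'' ∧ inD = false then
      if rest.head? = some '\'' then 2 + scanB rest.tail depth inS inD
      else 1 + scanB rest depth (!inS) inD
    else if c = '"' ∧ inS = false then
      if rest.head? = some '"' then 2 + scanB rest.tail depth inS inD
      else 1 + scanB rest depth inS (!inD)
    else if inS = false ∧ inD = false ∧ c = '(' then 1 + scanB rest (depth + 1) inS inD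
    else if inS = false ∧ inD = false ∧ c = ')' then 1 + scanB rest (depth - 1) inS inD
    else if inS = false ∧ inD = false ∧ c = ',' ∧ depth = 0 then 0
    else 1 + scanB rest depth inS inD
termination_by l.length
decreasing_by all_goals simp [List.length_tail]

-- Source B's outer while loop: slice out args_str[i:j] (take on the suffix) and continue from j+1
-- (drop on the suffix); the loop stops after the slice that ends at n.
def splitB (l : List Char) : List (List Char) :=
  let j := scanB l 0 false false
  l.take j :: (if h : j < l.length then splitB (l.drop (j + 1)) else [])
termination_by l.length
decreasing_by simp; omega

-- Source B's final `if segs[-1] == '': segs.pop()`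
def dropTrailEmpty (segs : List (List Char)) : List (List Char) :=
  if segs.getLast? = some [] then segs.dropLast else segs

def parse_function_args_py_alt (args_str : String) : List String :=
  (dropTrailEmpty (splitB args_str.toList)).map String.mk

-- ===== PRECONDITION & SPEC =====
def Spec_parse_function_args_py (args_str : String) (out : List String) : Prop := out = parse_function_args_py_alt args_str
instance (args_str : String) (out : List String) : Decidable (Spec_parse_function_args_py args_str out) := by unfold Spec_parse_function_args_py; infer_instance

-- ===== CLAIM (what is proved, stated in full; the proofs are below) =====
def Claim_equal_parse_function_args_py : Prop := ∀ (args_str : String), Dom_parse_function_args_py args_str → Spec_parse_function_args_py args_str (parse_function_args_py args_str)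

-- ===== LEMMAS AND PROOFS =====

-- splitB generalized to an arbitrary scanner start state (loopA's state mid-string).
def splitFrom (l : List Char) (d : Int) (s q : Bool) : List (List Char) :=
  let j := scanB l d s q
  l.take j :: (if _h : j < l.length then splitB (l.drop (j + 1)) else [])

theorem splitB_eq_splitFrom (l : List Char) : splitB l = splitFrom l 0 false false := by
  rw [splitB]; rfl

-- prepend a chunk onto the first segment
def consHead (p : List Char) : List (List Char) → List (List Char)
  | [] => [p]
  | h :: t => (p ++ h) :: t

theorem splitFrom_ne_nil (l : List Char) (d : Int) (s q : Bool) : splitFrom l d s q ≠ [] := by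
  simp [splitFrom]

theorem consHead_nil_eq (gs : List (List Char)) (h : gs ≠ []) : consHead [] gs = gs := by
  cases gs with
  | nil => exact absurd rfl h
  | cons a t => simp [consHead]

theorem consHead_consHead (a b : List Char) (gs : List (List Char)) (h : gs ≠ []) :
    consHead a (consHead b gs) = consHead (a ++ b) gs := by
  cases gs with
  | nil => exact absurd rfl h
  | cons x t => simp [consHead]

theorem splitFrom_shift1 (c : Char) (rest : List Char) (d : Int) (s q : Bool)
    (d' : Int) (s' q' : Bool)
    (h : scanB (c :: rest) d s q = 1 + scanB rest d' s' q') :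
    splitFrom (c :: rest) d s q = consHead [c] (splitFrom rest d' s' q') := by
  simp only [splitFrom]
  rw [h, Nat.add_comm 1 (scanB rest d' s' q')]
  simp only [List.take_succ_cons, List.length_cons, List.drop_succ_cons, consHead,
    List.singleton_append]
  congr 1
  by_cases h1 : scanB rest d' s' q' < rest.length
  · rw [dif_pos (by omega), dif_pos h1]
  · rw [dif_neg (by omega), dif_neg h1]

theorem splitFrom_shift2 (c1 c2 : Char) (rest : List Char) (d : Int) (s q : Bool)
    (h : scanB (c1 :: c2 :: rest) d s q = 2 + scanB rest d s q) :
    splitFrom (c1 :: c2 :: rest) d s q = consHead [c1, c2] (splitFrom rest d s q) := by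
  simp only [splitFrom]
  rw [h, show 2 + scanB rest d s q = scanB rest d s q + 1 + 1 by omega]
  simp only [List.take_succ_cons, List.length_cons, List.drop_succ_cons, consHead]
  congr 1
  by_cases h1 : scanB rest d s q < rest.length
  · rw [dif_pos (by omega), dif_pos h1]
  · rw [dif_neg (by omega), dif_neg h1]

theorem splitFrom_cut (rest : List Char) :
    splitFrom (',' :: rest) 0 false false = [] :: splitB rest := by
  have h : scanB (',' :: rest) 0 false false = 0 := by rw [scanB]; simp
  simp only [splitFrom]
  rw [h]
  simp

theorem loopA_eq (l : List Char) (args : List (List Char)) (cur : List Char)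
    (d : Int) (s q : Bool) :
    loopA l args cur d s q = dropTrailEmpty (args ++ consHead cur (splitFrom l d s q)) := by
  induction l, args, cur, d, s, q using loopA.induct with
  | case1 args d s q =>
    rw [loopA]
    have hs : splitFrom ([] : List Char) d s q = [[]] := by simp [splitFrom, scanB]
    rw [hs]
    simp [consHead, dropTrailEmpty]
  | case2 args cur d s q hc =>
    rw [loopA, if_neg hc]
    have hs : splitFrom ([] : List Char) d s q = [[]] := by simp [splitFrom, scanB]
    rw [hs]
    simp [consHead, dropTrailEmpty, hc]
  | case3 args cur d s q c rest hq hh ih =>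
    rw [loopA, if_pos hq, if_pos hh]
    obtain ⟨rest', hrest⟩ : ∃ rest', rest = '\'' :: rest' := by
      cases rest with
      | nil => simp at hh
      | cons r rt => simp at hh; exact ⟨rt, by rw [hh]⟩
    subst hrest; cases hq.1
    rw [splitFrom_shift2 '\'' '\'' rest' d s q
      (by rw [scanB, if_pos hq, if_pos hh]; rfl)]
    rw [consHead_consHead _ _ _ (splitFrom_ne_nil _ _ _ _)]
    exact ih
  | case4 args cur d s q c rest hq hh ih =>
    rw [loopA, if_pos hq, if_neg hh]
    rw [splitFrom_shift1 c rest d s q d (!s) q (by rw [scanB, if_pos hq, if_neg hh])]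
    rw [consHead_consHead _ _ _ (splitFrom_ne_nil _ _ _ _)]
    exact ih
  | case5 args cur d s q c rest h1 hq hh ih =>
    rw [loopA, if_neg h1, if_pos hq, if_pos hh]
    obtain ⟨rest', hrest⟩ : ∃ rest', rest = '"' :: rest' := by
      cases rest with
      | nil => simp at hh
      | cons r rt => simp at hh; exact ⟨rt, by rw [hh]⟩
    subst hrest; cases hq.1
    rw [splitFrom_shift2 '"' '"' rest' d s q
      (by rw [scanB, if_neg h1, if_pos hq, if_pos hh]; rfl)]
    rw [consHead_consHead _ _ _ (splitFrom_ne_nil _ _ _ _)]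
    exact ih
  | case6 args cur d s q c rest h1 hq hh ih =>
    rw [loopA, if_neg h1, if_pos hq, if_neg hh]
    rw [splitFrom_shift1 c rest d s q d s (!q) (by rw [scanB, if_neg h1, if_pos hq, if_neg hh])]
    rw [consHead_consHead _ _ _ (splitFrom_ne_nil _ _ _ _)]
    exact ih
  | case7 args cur d s q c rest h1 h2 hp ih =>
    rw [loopA, if_neg h1, if_neg h2, if_pos hp]
    rw [splitFrom_shift1 c rest d s q (d + 1) s q (by rw [scanB, if_neg h1, if_neg h2, if_pos hp])]
    rw [consHead_consHead _ _ _ (splitFrom_ne_nil _ _ _ _)]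
    exact ih
  | case8 args cur d s q c rest h1 h2 h3 hp ih =>
    rw [loopA, if_neg h1, if_neg h2, if_neg h3, if_pos hp]
    rw [splitFrom_shift1 c rest d s q (d - 1) s q
      (by rw [scanB, if_neg h1, if_neg h2, if_neg h3, if_pos hp])]
    rw [consHead_consHead _ _ _ (splitFrom_ne_nil _ _ _ _)]
    exact ih
  | case9 args cur d s q c rest h1 h2 h3 h4 hp ih =>
    rw [loopA, if_neg h1, if_neg h2, if_neg h3, if_neg h4, if_pos hp]
    obtain ⟨hs, hq, hc, hd⟩ := hp
    cases hs; cases hq; cases hd; cases hc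
    rw [splitFrom_cut, ih, splitB_eq_splitFrom]
    rw [consHead_nil_eq _ (splitFrom_ne_nil _ _ _ _)]
    simp [consHead]
  | case10 args cur d s q c rest h1 h2 h3 h4 h5 ih =>
    rw [loopA, if_neg h1, if_neg h2, if_neg h3, if_neg h4, if_neg h5]
    rw [splitFrom_shift1 c rest d s q d s q
      (by rw [scanB, if_neg h1, if_neg h2, if_neg h3, if_neg h4, if_neg h5])]
    rw [consHead_consHead _ _ _ (splitFrom_ne_nil _ _ _ _)]
    exact ih

-- ===== VERDICT (by name: the statement is the Claim_ definition above) =====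
theorem parse_function_args_py_spec : Claim_equal_parse_function_args_py := by
  intro args_str _
  unfold Spec_parse_function_args_py parse_function_args_py parse_function_args_py_alt
  rw [loopA_eq, splitB_eq_splitFrom]
  rw [consHead_nil_eq _ (splitFrom_ne_nil _ _ _ _)]
  rfl
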